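-- pv_equiv track=rewrite | github.com/Interstitch/Sectorwars2102 | DOCS/_discover_api_endpoints.py | categorize_endpoints
-- ===== SOURCE A (Python) =====
-- from collections import defaultdict
--
-- def categorize_endpoints(all_endpoints):
--     """Categorize endpoints by functional area"""
--     categories = defaultdict(list)
--
--     for file_name, endpoints in all_endpoints.items():
--         # Determine category from filename
--         if 'admin' in file_name:
--             if 'enhanced' in file_name:
--                 category = 'Admin Enhanced'
--             elif 'comprehensive' in file_name:
--                 category = 'Admin Comprehensive'
--             elif 'ships' in file_name:
--                 category = 'Admin Ships'
--             elif 'combat' in file_name: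
--                 category = 'Admin Combat'
--             elif 'economy' in file_name:
--                 category = 'Admin Economy'
--             elif 'colonization' in file_name:
--                 category = 'Admin Colonization'
--             elif 'fleets' in file_name:
--                 category = 'Admin Fleets'
--             elif 'drones' in file_name:
--                 category = 'Admin Drones'
--             elif 'factions' in file_name:
--                 category = 'Admin Factions'
--             elif 'messages' in file_name:
--                 category = 'Admin Messages'
--             else:
--                 category = 'Admin Core'
--         elif 'auth' in file_name:
--             category = 'Authentication'
--         elif 'user' in file_name:
--             category = 'User Management'
--         elif 'player' in file_name:
--             category = 'Player'
--         elif 'combat' in file_name: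
--             category = 'Combat'
--         elif 'economy' in file_name or 'trading' in file_name:
--             category = 'Economy & Trading'
--         elif 'sector' in file_name:
--             category = 'Sectors'
--         elif 'planet' in file_name:
--             category = 'Planets'
--         elif 'fleet' in file_name:
--             category = 'Fleets'
--         elif 'drone' in file_name:
--             category = 'Drones'
--         elif 'faction' in file_name:
--             category = 'Factions'
--         elif 'team' in file_name:
--             category = 'Teams'
--         elif 'message' in file_name:
--             category = 'Messages'
--         elif 'ai' in file_name:
--             category = 'AI Systems'
--         elif 'websocket' in file_name:
--             category = 'WebSocket'
--         elif 'paypal' in file_name: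
--             category = 'Payment'
--         elif 'mfa' in file_name:
--             category = 'Security (MFA)'
--         elif 'regional' in file_name or 'nexus' in file_name:
--             category = 'Multi-Regional'
--         elif 'translation' in file_name:
--             category = 'Internationalization'
--         elif 'event' in file_name:
--             category = 'Events'
--         elif 'audit' in file_name:
--             category = 'Audit'
--         elif 'status' in file_name:
--             category = 'System Status'
--         elif 'first_login' in file_name:
--             category = 'First Login'
--         elif 'debug' in file_name:
--             category = 'Debug (Dev Only)'
--         elif 'test' in file_name:
--             category = 'Test (Dev Only)'
--         else:
--             category = 'Other'
--
--         for endpoint in endpoints: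
--             categories[category].append({
--                 'file': file_name,
--                 **endpoint
--             })
--
--     return categories
-- ===== SOURCE B (Python) =====
-- from collections import defaultdict
--
-- # All category keywords, as one flat set.
-- _KEYWORDS = frozenset({
--     'admin', 'enhanced', 'comprehensive', 'ships', 'combat', 'economy',
--     'colonization', 'fleets', 'drones', 'factions', 'messages',
--     'auth', 'user', 'player', 'trading', 'sector', 'planet', 'fleet',
--     'drone', 'faction', 'team', 'message', 'ai', 'websocket', 'paypal',
--     'mfa', 'regional', 'nexus', 'translation', 'event', 'audit', 'status',
--     'first_login', 'debug', 'test',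
-- })
-- _LENGTHS = sorted({len(k) for k in _KEYWORDS})
--
-- # Admin sub-categories, in priority order.
-- _ADMIN_SUBS = [
--     ('enhanced', 'Admin Enhanced'),
--     ('comprehensive', 'Admin Comprehensive'),
--     ('ships', 'Admin Ships'),
--     ('combat', 'Admin Combat'),
--     ('economy', 'Admin Economy'),
--     ('colonization', 'Admin Colonization'),
--     ('fleets', 'Admin Fleets'),
--     ('drones', 'Admin Drones'),
--     ('factions', 'Admin Factions'),
--     ('messages', 'Admin Messages'),
-- ]
--
-- # Non-admin categories, in priority order; a category applies when its keyword
-- # set intersects the set of keywords found in the file name.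
-- _GENERAL = [
--     (frozenset({'auth'}), 'Authentication'),
--     (frozenset({'user'}), 'User Management'),
--     (frozenset({'player'}), 'Player'),
--     (frozenset({'combat'}), 'Combat'),
--     (frozenset({'economy', 'trading'}), 'Economy & Trading'),
--     (frozenset({'sector'}), 'Sectors'),
--     (frozenset({'planet'}), 'Planets'),
--     (frozenset({'fleet'}), 'Fleets'),
--     (frozenset({'drone'}), 'Drones'),
--     (frozenset({'faction'}), 'Factions'),
--     (frozenset({'team'}), 'Teams'),
--     (frozenset({'message'}), 'Messages'),
--     (frozenset({'ai'}), 'AI Systems'),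
--     (frozenset({'websocket'}), 'WebSocket'),
--     (frozenset({'paypal'}), 'Payment'),
--     (frozenset({'mfa'}), 'Security (MFA)'),
--     (frozenset({'regional', 'nexus'}), 'Multi-Regional'),
--     (frozenset({'translation'}), 'Internationalization'),
--     (frozenset({'event'}), 'Events'),
--     (frozenset({'audit'}), 'Audit'),
--     (frozenset({'status'}), 'System Status'),
--     (frozenset({'first_login'}), 'First Login'),
--     (frozenset({'debug'}), 'Debug (Dev Only)'),
--     (frozenset({'test'}), 'Test (Dev Only)'),
-- ]
--
--
-- def _matched(file_name):
--     """Text-driven matching: enumerate the substrings of file_name whose length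
--     is a keyword length and keep those that are keywords."""
--     n = len(file_name)
--     return {file_name[i:i + L]
--             for L in _LENGTHS
--             for i in range(n - L + 1)
--             if file_name[i:i + L] in _KEYWORDS}
--
--
-- def _category(found):
--     """Decide the category from the set of keywords present in the file name."""
--     if 'admin' in found:
--         for sub, cat in _ADMIN_SUBS:
--             if sub in found:
--                 return cat
--         return 'Admin Core'
--     for keys, cat in _GENERAL:
--         if not keys.isdisjoint(found):
--             return cat
--     return 'Other'
--
--
-- def categorize_endpoints(all_endpoints):
--     """Categorize endpoints by functional area"""
--     categories = defaultdict(list)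
--     for file_name, endpoints in all_endpoints.items():
--         category = _category(_matched(file_name))
--         for endpoint in endpoints:
--             categories[category].append({'file': file_name, **endpoint})
--     return categories
-- ===== Notes on version B (the rewrite author's own statement) =====
-- stated objective: alternative
-- what changed: B inverts the matching direction: instead of running the file name through a 36-branch if/elif chain of per-keyword substring searches, it enumerates the substrings of the file name (at the keyword lengths) once against a flat keyword set to build the set of keywords present, then decides the category from that set (admin sub-table lookup, else first keyword-set intersecting the found set); the record-building loop and defaultdict(list) result are unchanged.
import Mathlib
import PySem

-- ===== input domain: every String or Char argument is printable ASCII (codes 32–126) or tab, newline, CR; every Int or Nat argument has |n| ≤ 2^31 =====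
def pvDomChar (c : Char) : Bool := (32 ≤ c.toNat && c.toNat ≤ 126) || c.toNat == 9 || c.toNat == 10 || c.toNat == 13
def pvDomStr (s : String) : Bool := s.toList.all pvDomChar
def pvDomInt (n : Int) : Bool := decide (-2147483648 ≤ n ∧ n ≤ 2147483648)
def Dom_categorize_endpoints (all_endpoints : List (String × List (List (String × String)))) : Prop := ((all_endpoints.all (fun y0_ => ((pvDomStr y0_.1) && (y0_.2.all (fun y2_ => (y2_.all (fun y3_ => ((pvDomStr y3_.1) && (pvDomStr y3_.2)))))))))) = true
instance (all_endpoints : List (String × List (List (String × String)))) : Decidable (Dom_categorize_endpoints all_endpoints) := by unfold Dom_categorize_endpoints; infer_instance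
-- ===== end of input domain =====

-- B inverts the matching: instead of searching the file name once per keyword through a
-- 36-branch if/elif chain, it enumerates the substrings of the file name once to collect the
-- set of keywords present, then decides the category from that set (objective: alternative).

-- ===== PORT A =====
-- Literal transliteration of A's if/elif chain computing the category of a file name.
def pvCategoryA (file_name : String) : String :=
  if PySem.Str.isIn "admin" file_name then
    if PySem.Str.isIn "enhanced" file_name then "Admin Enhanced"
    else if PySem.Str.isIn "comprehensive" file_name then "Admin Comprehensive"
    else if PySem.Str.isIn "ships" file_name then "Admin Ships"
    else if PySem.Str.isIn "combat" file_name then "Admin Combat"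
    else if PySem.Str.isIn "economy" file_name then "Admin Economy"
    else if PySem.Str.isIn "colonization" file_name then "Admin Colonization"
    else if PySem.Str.isIn "fleets" file_name then "Admin Fleets"
    else if PySem.Str.isIn "drones" file_name then "Admin Drones"
    else if PySem.Str.isIn "factions" file_name then "Admin Factions"
    else if PySem.Str.isIn "messages" file_name then "Admin Messages"
    else "Admin Core"
  else if PySem.Str.isIn "auth" file_name then "Authentication"
  else if PySem.Str.isIn "user" file_name then "User Management"
  else if PySem.Str.isIn "player" file_name then "Player"
  else if PySem.Str.isIn "combat" file_name then "Combat"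
  else if PySem.Str.isIn "economy" file_name || PySem.Str.isIn "trading" file_name then "Economy & Trading"
  else if PySem.Str.isIn "sector" file_name then "Sectors"
  else if PySem.Str.isIn "planet" file_name then "Planets"
  else if PySem.Str.isIn "fleet" file_name then "Fleets"
  else if PySem.Str.isIn "drone" file_name then "Drones"
  else if PySem.Str.isIn "faction" file_name then "Factions"
  else if PySem.Str.isIn "team" file_name then "Teams"
  else if PySem.Str.isIn "message" file_name then "Messages"
  else if PySem.Str.isIn "ai" file_name then "AI Systems"
  else if PySem.Str.isIn "websocket" file_name then "WebSocket"
  else if PySem.Str.isIn "paypal" file_name then "Payment"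
  else if PySem.Str.isIn "mfa" file_name then "Security (MFA)"
  else if PySem.Str.isIn "regional" file_name || PySem.Str.isIn "nexus" file_name then "Multi-Regional"
  else if PySem.Str.isIn "translation" file_name then "Internationalization"
  else if PySem.Str.isIn "event" file_name then "Events"
  else if PySem.Str.isIn "audit" file_name then "Audit"
  else if PySem.Str.isIn "status" file_name then "System Status"
  else if PySem.Str.isIn "first_login" file_name then "First Login"
  else if PySem.Str.isIn "debug" file_name then "Debug (Dev Only)"
  else if PySem.Str.isIn "test" file_name then "Test (Dev Only)"
  else "Other"

def categorize_endpoints (all_endpoints : List (String × List (List (String × String)))) : List (String × List (List (String × String))) :=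
  (all_endpoints.foldl
    (fun categories fe =>
      let category := pvCategoryA fe.1
      fe.2.foldl
        (fun categories endpoint =>
          categories.modify category []
            (fun recs => recs ++ [((PySem.Dict.empty.insert "file" fe.1).update endpoint).items]))
        categories)
    (PySem.Dict.empty : PySem.Dict String (List (List (String × String))))).items

-- ===== PORT B =====
-- _KEYWORDS: the flat set of all category keywords (used only for membership / lengths).
def pvKeywords : List (List Char) :=
  ["admin".toList, "enhanced".toList, "comprehensive".toList, "ships".toList, "combat".toList,
   "economy".toList, "colonization".toList, "fleets".toList, "drones".toList, "factions".toList,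
   "messages".toList, "auth".toList, "user".toList, "player".toList, "trading".toList,
   "sector".toList, "planet".toList, "fleet".toList, "drone".toList, "faction".toList,
   "team".toList, "message".toList, "ai".toList, "websocket".toList, "paypal".toList,
   "mfa".toList, "regional".toList, "nexus".toList, "translation".toList, "event".toList,
   "audit".toList, "status".toList, "first_login".toList, "debug".toList, "test".toList]

-- _LENGTHS = sorted({len(k) for k in _KEYWORDS})
def pvLengths : List Int :=
  PySem.List.sorted (PySem.Set.ofList (pvKeywords.map (fun k => (k.length : Int)))) (fun x => x) false

-- _matched(file_name): the set comprehension over substrings of keyword lengths.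
def pvMatched (f : List Char) : PySem.Set (List Char) :=
  PySem.Set.ofList (pvLengths.flatMap (fun L =>
    (PySem.List.pyRange 0 ((f.length : Int) - L + 1) 1).filterMap (fun i =>
      if pvKeywords.contains (PySem.List.slice f (some i) (some (i + L))) then
        some (PySem.List.slice f (some i) (some (i + L)))
      else none)))

def pvAdminSubs : List (List Char × String) :=
  [("enhanced".toList, "Admin Enhanced"), ("comprehensive".toList, "Admin Comprehensive"),
   ("ships".toList, "Admin Ships"), ("combat".toList, "Admin Combat"),
   ("economy".toList, "Admin Economy"), ("colonization".toList, "Admin Colonization"),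
   ("fleets".toList, "Admin Fleets"), ("drones".toList, "Admin Drones"),
   ("factions".toList, "Admin Factions"), ("messages".toList, "Admin Messages")]

def pvGeneral : List (PySem.Set (List Char) × String) :=
  [(PySem.Set.ofList ["auth".toList], "Authentication"),
   (PySem.Set.ofList ["user".toList], "User Management"),
   (PySem.Set.ofList ["player".toList], "Player"),
   (PySem.Set.ofList ["combat".toList], "Combat"),
   (PySem.Set.ofList ["economy".toList, "trading".toList], "Economy & Trading"),
   (PySem.Set.ofList ["sector".toList], "Sectors"),
   (PySem.Set.ofList ["planet".toList], "Planets"),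
   (PySem.Set.ofList ["fleet".toList], "Fleets"),
   (PySem.Set.ofList ["drone".toList], "Drones"),
   (PySem.Set.ofList ["faction".toList], "Factions"),
   (PySem.Set.ofList ["team".toList], "Teams"),
   (PySem.Set.ofList ["message".toList], "Messages"),
   (PySem.Set.ofList ["ai".toList], "AI Systems"),
   (PySem.Set.ofList ["websocket".toList], "WebSocket"),
   (PySem.Set.ofList ["paypal".toList], "Payment"),
   (PySem.Set.ofList ["mfa".toList], "Security (MFA)"),
   (PySem.Set.ofList ["regional".toList, "nexus".toList], "Multi-Regional"),
   (PySem.Set.ofList ["translation".toList], "Internationalization"),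
   (PySem.Set.ofList ["event".toList], "Events"),
   (PySem.Set.ofList ["audit".toList], "Audit"),
   (PySem.Set.ofList ["status".toList], "System Status"),
   (PySem.Set.ofList ["first_login".toList], "First Login"),
   (PySem.Set.ofList ["debug".toList], "Debug (Dev Only)"),
   (PySem.Set.ofList ["test".toList], "Test (Dev Only)")]

-- _category(found): decide from the set of keywords present.
def pvCategory (found : PySem.Set (List Char)) : String :=
  if PySem.Set.contains found "admin".toList then
    (((pvAdminSubs.find? (fun p => PySem.Set.contains found p.1)).map Prod.snd).getD "Admin Core")
  else
    (((pvGeneral.find? (fun p => !PySem.Set.isdisjoint p.1 found)).map Prod.snd).getD "Other")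

def categorize_endpoints_alt (all_endpoints : List (String × List (List (String × String)))) : List (String × List (List (String × String))) :=
  (all_endpoints.foldl
    (fun categories fe =>
      let category := pvCategory (pvMatched fe.1.toList)
      fe.2.foldl
        (fun categories endpoint =>
          categories.modify category []
            (fun recs => recs ++ [((PySem.Dict.empty.insert "file" fe.1).update endpoint).items]))
        categories)
    (PySem.Dict.empty : PySem.Dict String (List (List (String × String))))).items

-- ===== PRECONDITION & SPEC =====
def Spec_categorize_endpoints (all_endpoints : List (String × List (List (String × String)))) (out : List (String × List (List (String × String)))) : Prop := out = categorize_endpoints_alt all_endpoints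
instance (all_endpoints : List (String × List (List (String × String)))) (out : List (String × List (List (String × String)))) : Decidable (Spec_categorize_endpoints all_endpoints out) := by unfold Spec_categorize_endpoints; infer_instance

-- ===== CLAIM (what is proved, stated in full; the proofs are below) =====
def Claim_equal_categorize_endpoints : Prop := ∀ (all_endpoints : List (String × List (List (String × String)))), Dom_categorize_endpoints all_endpoints → Spec_categorize_endpoints all_endpoints (categorize_endpoints all_endpoints)

-- ===== LEMMAS AND PROOFS =====

set_option maxRecDepth 10000 in
theorem pvLengths_pos : ∀ L ∈ pvLengths, 0 < L := by decide

set_option maxRecDepth 10000 in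
theorem pvKeywords_length_pos : ∀ k ∈ pvKeywords, 0 < k.length := by decide

set_option maxRecDepth 10000 in
theorem pvKeywords_length_mem : ∀ k ∈ pvKeywords, ((k.length : Int)) ∈ pvLengths := by decide

-- Membership in the substring-enumeration set is exactly Python's 'keyword in file_name'.
theorem contains_matched (f : List Char) : ∀ k ∈ pvKeywords,
    PySem.Set.contains (pvMatched f) k = PySem.Chars.isIn k f := by
  intro k hk
  rw [Bool.eq_iff_iff]
  constructor
  · intro h
    simp only [PySem.Set.contains, List.contains_iff_mem] at h
    rw [pvMatched, PySem.Set.mem_ofList, List.mem_flatMap] at h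
    obtain ⟨L, hL, h⟩ := h
    rw [List.mem_filterMap] at h
    obtain ⟨i, hi, heq⟩ := h
    split_ifs at heq with hcond
    · have hi' := PySem.List.mem_pyRange_one.mp hi
      have hLpos := pvLengths_pos L hL
      obtain ⟨a, rfl⟩ : ∃ a : ℕ, i = (a : Int) := ⟨i.toNat, (Int.toNat_of_nonneg hi'.1).symm⟩
      obtain ⟨b, rfl⟩ : ∃ b : ℕ, L = (b : Int) := ⟨L.toNat, (Int.toNat_of_nonneg (le_of_lt hLpos)).symm⟩
      rw [PySem.List.slice_natCast_add] at heq
      obtain rfl : List.take b (List.drop a f) = k := Option.some.inj heq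
      exact (PySem.Chars.exists_prefix_drop_iff_isIn _ f).mp ⟨a, List.take_prefix _ _⟩
  · intro h
    obtain ⟨j, hpre⟩ := (PySem.Chars.exists_prefix_drop_iff_isIn k f).mpr h
    have hlen : k.length ≤ f.length - j := by
      have := hpre.length_le; simpa using this
    have hk0 := pvKeywords_length_pos k hk
    simp only [PySem.Set.contains, List.contains_iff_mem]
    rw [pvMatched, PySem.Set.mem_ofList, List.mem_flatMap]
    refine ⟨(k.length : Int), pvKeywords_length_mem k hk, ?_⟩
    rw [List.mem_filterMap]
    refine ⟨(j : Int), ?_, ?_⟩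
    · rw [PySem.List.mem_pyRange_one]
      constructor
      · exact_mod_cast Nat.zero_le j
      · omega
    · rw [PySem.List.slice_natCast_add]
      have hk' : List.take k.length (List.drop j f) = k := (List.prefix_iff_eq_take.mp hpre).symm
      rw [hk']
      simp [hk]

theorem isdis1 (M : PySem.Set (List Char)) (k : List Char) :
    PySem.Set.isdisjoint (PySem.Set.ofList [k]) M = !(PySem.Set.contains M k) := by
  simp [PySem.Set.isdisjoint, PySem.Set.ofList, PySem.Set.add, PySem.Set.empty,
        PySem.Set.contains]

theorem isdis2 (M : PySem.Set (List Char)) (k1 k2 : List Char) (hne : k2 ≠ k1) :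
    PySem.Set.isdisjoint (PySem.Set.ofList [k1, k2]) M
      = !(PySem.Set.contains M k1 || PySem.Set.contains M k2) := by
  simp [PySem.Set.isdisjoint, PySem.Set.ofList, PySem.Set.add, PySem.Set.empty,
        PySem.Set.contains, hne]

set_option maxHeartbeats 4000000 in
set_option maxRecDepth 100000 in
theorem pvCategory_eq (f : String) : pvCategoryA f = pvCategory (pvMatched f.toList) := by
  have cm := contains_matched f.toList
  have c0 := cm "admin".toList (by decide)
  have c1 := cm "enhanced".toList (by decide)
  have c2 := cm "comprehensive".toList (by decide)
  have c3 := cm "ships".toList (by decide)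
  have c4 := cm "combat".toList (by decide)
  have c5 := cm "economy".toList (by decide)
  have c6 := cm "colonization".toList (by decide)
  have c7 := cm "fleets".toList (by decide)
  have c8 := cm "drones".toList (by decide)
  have c9 := cm "factions".toList (by decide)
  have c10 := cm "messages".toList (by decide)
  have c11 := cm "auth".toList (by decide)
  have c12 := cm "user".toList (by decide)
  have c13 := cm "player".toList (by decide)
  have c14 := cm "trading".toList (by decide)
  have c15 := cm "sector".toList (by decide)
  have c16 := cm "planet".toList (by decide)
  have c17 := cm "fleet".toList (by decide)
  have c18 := cm "drone".toList (by decide)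
  have c19 := cm "faction".toList (by decide)
  have c20 := cm "team".toList (by decide)
  have c21 := cm "message".toList (by decide)
  have c22 := cm "ai".toList (by decide)
  have c23 := cm "websocket".toList (by decide)
  have c24 := cm "paypal".toList (by decide)
  have c25 := cm "mfa".toList (by decide)
  have c26 := cm "regional".toList (by decide)
  have c27 := cm "nexus".toList (by decide)
  have c28 := cm "translation".toList (by decide)
  have c29 := cm "event".toList (by decide)
  have c30 := cm "audit".toList (by decide)
  have c31 := cm "status".toList (by decide)
  have c32 := cm "first_login".toList (by decide)
  have c33 := cm "debug".toList (by decide)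
  have c34 := cm "test".toList (by decide)
  have g1 : PySem.Set.isdisjoint (PySem.Set.ofList ["economy".toList, "trading".toList]) (pvMatched f.toList)
      = !(PySem.Chars.isIn "economy".toList f.toList || PySem.Chars.isIn "trading".toList f.toList) := by
    rw [isdis2 _ _ _ (by decide), c5, c14]
  have g2 : PySem.Set.isdisjoint (PySem.Set.ofList ["regional".toList, "nexus".toList]) (pvMatched f.toList)
      = !(PySem.Chars.isIn "regional".toList f.toList || PySem.Chars.isIn "nexus".toList f.toList) := by
    rw [isdis2 _ _ _ (by decide), c26, c27]
  unfold pvCategoryA pvCategory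
  simp only [pvAdminSubs, pvGeneral, List.find?_cons, List.find?_nil, PySem.Str.isIn, isdis1,
    g1, g2, Bool.not_not]
  simp only [c0, c1, c2, c3, c4, c5, c6, c7, c8, c9, c10, c11, c12, c13, c15, c16, c17, c18, c19, c20, c21, c22, c23, c24, c25, c28, c29, c30, c31, c32, c33, c34]
  cases h : PySem.Chars.isIn ['a','d','m','i','n'] f.toList <;> simp [h]
  case false =>
    by_cases h1 : PySem.Chars.isIn ['a','u','t','h'] f.toList = true <;> simp [h1]
    by_cases h2 : PySem.Chars.isIn ['u','s','e','r'] f.toList = true <;> simp [h2]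
    by_cases h3 : PySem.Chars.isIn ['p','l','a','y','e','r'] f.toList = true <;> simp [h3]
    by_cases h4 : PySem.Chars.isIn ['c','o','m','b','a','t'] f.toList = true <;> simp [h4]
    by_cases h5 : PySem.Chars.isIn ['e','c','o','n','o','m','y'] f.toList = true <;> simp [h5]
    by_cases h6 : PySem.Chars.isIn ['t','r','a','d','i','n','g'] f.toList = true <;> simp [h6]
    by_cases h7 : PySem.Chars.isIn ['s','e','c','t','o','r'] f.toList = true <;> simp [h7]
    by_cases h8 : PySem.Chars.isIn ['p','l','a','n','e','t'] f.toList = true <;> simp [h8]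
    by_cases h9 : PySem.Chars.isIn ['f','l','e','e','t'] f.toList = true <;> simp [h9]
    by_cases h10 : PySem.Chars.isIn ['d','r','o','n','e'] f.toList = true <;> simp [h10]
    by_cases h11 : PySem.Chars.isIn ['f','a','c','t','i','o','n'] f.toList = true <;> simp [h11]
    by_cases h12 : PySem.Chars.isIn ['t','e','a','m'] f.toList = true <;> simp [h12]
    by_cases h13 : PySem.Chars.isIn ['m','e','s','s','a','g','e'] f.toList = true <;> simp [h13]
    by_cases h14 : PySem.Chars.isIn ['a','i'] f.toList = true <;> simp [h14]
    by_cases h15 : PySem.Chars.isIn ['w','e','b','s','o','c','k','e','t'] f.toList = true <;> simp [h15]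
    by_cases h16 : PySem.Chars.isIn ['p','a','y','p','a','l'] f.toList = true <;> simp [h16]
    by_cases h17 : PySem.Chars.isIn ['m','f','a'] f.toList = true <;> simp [h17]
    by_cases h18 : PySem.Chars.isIn ['r','e','g','i','o','n','a','l'] f.toList = true <;> simp [h18]
    by_cases h19 : PySem.Chars.isIn ['n','e','x','u','s'] f.toList = true <;> simp [h19]
    by_cases h20 : PySem.Chars.isIn ['t','r','a','n','s','l','a','t','i','o','n'] f.toList = true <;> simp [h20]
    by_cases h21 : PySem.Chars.isIn ['e','v','e','n','t'] f.toList = true <;> simp [h21]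
    by_cases h22 : PySem.Chars.isIn ['a','u','d','i','t'] f.toList = true <;> simp [h22]
    by_cases h23 : PySem.Chars.isIn ['s','t','a','t','u','s'] f.toList = true <;> simp [h23]
    by_cases h24 : PySem.Chars.isIn ['f','i','r','s','t','_','l','o','g','i','n'] f.toList = true <;> simp [h24]
    by_cases h25 : PySem.Chars.isIn ['d','e','b','u','g'] f.toList = true <;> simp [h25]
    by_cases h26 : PySem.Chars.isIn ['t','e','s','t'] f.toList = true <;> simp [h26]
  case true =>
    by_cases g1 : PySem.Chars.isIn ['e','n','h','a','n','c','e','d'] f.toList = true <;> simp [g1]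
    by_cases g2 : PySem.Chars.isIn ['c','o','m','p','r','e','h','e','n','s','i','v','e'] f.toList = true <;> simp [g2]
    by_cases g3 : PySem.Chars.isIn ['s','h','i','p','s'] f.toList = true <;> simp [g3]
    by_cases g4 : PySem.Chars.isIn ['c','o','m','b','a','t'] f.toList = true <;> simp [g4]
    by_cases g5 : PySem.Chars.isIn ['e','c','o','n','o','m','y'] f.toList = true <;> simp [g5]
    by_cases g6 : PySem.Chars.isIn ['c','o','l','o','n','i','z','a','t','i','o','n'] f.toList = true <;> simp [g6]
    by_cases g7 : PySem.Chars.isIn ['f','l','e','e','t','s'] f.toList = true <;> simp [g7]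
    by_cases g8 : PySem.Chars.isIn ['d','r','o','n','e','s'] f.toList = true <;> simp [g8]
    by_cases g9 : PySem.Chars.isIn ['f','a','c','t','i','o','n','s'] f.toList = true <;> simp [g9]
    by_cases g10 : PySem.Chars.isIn ['m','e','s','s','a','g','e','s'] f.toList = true <;> simp [g10]

-- ===== VERDICT (by name: the statement is the Claim_ definition above) =====
theorem categorize_endpoints_spec : Claim_equal_categorize_endpoints := by
  intro xs _
  unfold Spec_categorize_endpoints categorize_endpoints categorize_endpoints_alt
  simp only [pvCategory_eq]
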